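-- pv_equiv track=rewrite | github.com/Evok086/NSI_partage | Pratique/Semaine 10/Semaine 10.py | pile_positive_v2
-- ===== SOURCE A (Python) =====
-- def pile_positive_v2(pile):
--     pile_tampon = []
--     new_pile = []
--     while not len(pile) == 0:
--         elt = pile.pop()
--         if elt > 0:
--             new_pile.append(elt)
--         pile_tampon.append(elt)
--     while len(pile_tampon) != 0:
--         elt = pile_tampon.pop()
--         pile.append(elt)
--     return new_pile
-- ===== SOURCE B (Python) =====
-- def pile_positive_v2(pile):
--     # Read-only one pass: positives in pop order; pile is never mutated
--     # (A restores pile exactly, so the final state of pile is the same).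
--     return [x for x in reversed(pile) if x > 0]
-- ===== Notes on version B (the rewrite author's own statement) =====
-- stated objective: simpler
-- what changed: Replaces A's two destructive loops (pop everything into a buffer while collecting positives, then pop the buffer back to restore the stack) with a single non-destructive comprehension over reversed(pile).
import Mathlib
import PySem

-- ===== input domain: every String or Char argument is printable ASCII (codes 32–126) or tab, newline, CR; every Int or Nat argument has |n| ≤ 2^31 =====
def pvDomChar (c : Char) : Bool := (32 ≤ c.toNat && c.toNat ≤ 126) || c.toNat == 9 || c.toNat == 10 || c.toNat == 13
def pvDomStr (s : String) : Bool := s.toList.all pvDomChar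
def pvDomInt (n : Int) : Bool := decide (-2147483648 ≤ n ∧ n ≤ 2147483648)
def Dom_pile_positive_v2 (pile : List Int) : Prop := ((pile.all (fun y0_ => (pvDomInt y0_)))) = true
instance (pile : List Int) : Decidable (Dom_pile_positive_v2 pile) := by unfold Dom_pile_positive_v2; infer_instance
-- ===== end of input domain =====

-- B replaces A's two destructive pop/restore loops with one read-only filter over
-- the reversed list (return value only: A mutates pile but restores it exactly, B never mutates).


-- ===== PORT A =====
-- first while loop: pop from the end of pile, push onto pile_tampon, collect positives
-- into new_pile; returns the state (pile_tampon, new_pile) when pile is empty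
def pvALoop1 : List Int → List Int → List Int → List Int × List Int
  | [], pile_tampon, new_pile => (pile_tampon, new_pile)
  | a :: rest, pile_tampon, new_pile =>
    let elt := (a :: rest).getLast (by simp)
    pvALoop1 (a :: rest).dropLast (pile_tampon ++ [elt])
      (if elt > 0 then new_pile ++ [elt] else new_pile)
termination_by pile _ _ => pile.length
decreasing_by simp [List.length_dropLast]

-- second while loop: pop pile_tampon back onto pile (restores the stack)
def pvALoop2 : List Int → List Int → List Int
  | [], pile => pile
  | a :: rest, pile =>
    let elt := (a :: rest).getLast (by simp)
    pvALoop2 (a :: rest).dropLast (pile ++ [elt])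
termination_by t _ => t.length
decreasing_by simp [List.length_dropLast]

def pile_positive_v2 (pile : List Int) : List Int :=
  let st := pvALoop1 pile [] []
  let _restored := pvALoop2 st.1 []   -- restores pile; does not affect the return value
  st.2

-- ===== PORT B =====
def pile_positive_v2_alt (pile : List Int) : List Int :=
  pile.reverse.filter (fun x => decide (x > 0))

-- ===== PRECONDITION & SPEC =====
def Spec_pile_positive_v2 (pile : List Int) (out : List Int) : Prop := out = pile_positive_v2_alt pile
instance (pile : List Int) (out : List Int) : Decidable (Spec_pile_positive_v2 pile out) := by unfold Spec_pile_positive_v2; infer_instance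

-- ===== CLAIM (what is proved, stated in full; the proofs are below) =====
def Claim_equal_pile_positive_v2 : Prop := ∀ (pile : List Int), Dom_pile_positive_v2 pile → Spec_pile_positive_v2 pile (pile_positive_v2 pile)

-- ===== LEMMAS AND PROOFS =====

theorem pvALoop1_snd (n : ℕ) : ∀ (pile t np : List Int), pile.length = n →
    (pvALoop1 pile t np).2 = np ++ pile.reverse.filter (fun x => decide (x > 0)) := by
  induction n with
  | zero =>
    intro pile t np h
    have : pile = [] := List.eq_nil_of_length_eq_zero h
    subst this; simp [pvALoop1]
  | succ k ih =>
    intro pile t np h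
    match hp : pile with
    | [] => simp at h
    | a :: rest =>
      rw [pvALoop1]
      have hne : (a :: rest : List Int) ≠ [] := by simp
      have hdec : ((a :: rest : List Int).dropLast ++ [(a :: rest : List Int).getLast hne]) = a :: rest :=
        List.dropLast_append_getLast hne
      have hlen : (a :: rest : List Int).dropLast.length = k := by
        simp at h; simp [List.length_dropLast, h]
      rw [ih _ _ _ hlen]
      have hrev : (a :: rest : List Int).reverse =
          (a :: rest : List Int).getLast hne :: (a :: rest : List Int).dropLast.reverse := by
        conv_lhs => rw [← hdec]
        simp
      rw [hrev]
      by_cases hpos : (a :: rest : List Int).getLast hne > 0 <;>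
        simp [hpos]

-- ===== VERDICT (by name: the statement is the Claim_ definition above) =====
theorem pile_positive_v2_spec : Claim_equal_pile_positive_v2 := by
  intro pile _
  show pile_positive_v2 pile = pile_positive_v2_alt pile
  unfold pile_positive_v2 pile_positive_v2_alt
  simpa using pvALoop1_snd pile.length pile [] [] rfl
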